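-- pv_equiv track=rewrite | github.com/mohamednaleem/cmems | python/even_followed_by_odd_3.py | process_string
-- ===== SOURCE A (Python) =====
-- def process_string(s):
--     # Extract digits and special characters
--     digits = [char for char in s if char.isdigit()]
--     special_chars = [char for char in s if not char.isalnum()]
--
--     # Separate even and odd digits
--     even_digits = [char for char in digits if int(char) % 2 == 0]
--     odd_digits = [char for char in digits if int(char) % 2 != 0]
--
--     # Determine the starting order based on the number of special characters
--     start_with_even = len(special_chars) % 2 == 0
--
--     result = []
--     i, j = 0, 0
--
--     # Alternate between even and odd digits
--     while i < len(even_digits) and j < len(odd_digits):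
--         if start_with_even:
--             result.append(even_digits[i])
--             i += 1
--             start_with_even = False
--         else:
--             result.append(odd_digits[j])
--             j += 1
--             start_with_even = True
--
--     # Append remaining digits
--     result.extend(even_digits[i:])
--     result.extend(odd_digits[j:])
--
--     # Join the result into a single string
--     result_str = ''.join(result)
--
--     return result_str
-- ===== SOURCE B (Python) =====
-- def process_string(s):
--     # Schedule-key decoration + sort: each digit gets the position it must occupy
--     # in the final alternating order (evens at 2i+a, odds at 2j+b, offsets chosen
--     # by special-character parity); a single stable sort by key yields the answer.
--     specials = sum(1 for c in s if not c.isalnum())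
--     even_first = specials % 2 == 0
--     keyed = []
--     ce = co = 0
--     for c in s:
--         if c.isdigit():
--             if int(c) % 2 == 0:
--                 keyed.append((2 * ce + (0 if even_first else 1), c))
--                 ce += 1
--             else:
--                 keyed.append((2 * co + (1 if even_first else 0), c))
--                 co += 1
--     keyed.sort(key=lambda t: t[0])
--     return ''.join(c for _, c in keyed)
-- ===== Notes on version B (the rewrite author's own statement) =====
-- stated objective: alternative
-- what changed: Replaces A's two-pointer alternating merge of pre-filtered even/odd digit lists by a decorate-and-sort algorithm: each digit is tagged in one pass with the schedule position it must occupy in the final alternating order (2i+offset per parity, offsets chosen by special-character parity) and one sort by that key produces the result.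
import Mathlib
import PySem

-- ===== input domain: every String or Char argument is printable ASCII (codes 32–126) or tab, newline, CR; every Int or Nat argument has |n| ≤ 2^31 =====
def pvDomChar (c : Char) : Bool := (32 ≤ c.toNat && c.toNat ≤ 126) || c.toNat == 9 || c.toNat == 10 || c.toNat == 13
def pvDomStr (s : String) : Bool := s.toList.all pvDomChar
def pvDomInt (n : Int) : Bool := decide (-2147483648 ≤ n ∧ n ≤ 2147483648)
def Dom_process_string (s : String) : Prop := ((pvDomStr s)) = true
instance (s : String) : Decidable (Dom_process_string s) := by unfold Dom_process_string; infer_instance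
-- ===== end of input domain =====

-- B replaces A's partition-and-alternate merge loop by decorating each digit with its
-- final schedule position and sorting by that key once (objective: alternative).

-- ===== PORT A =====
-- int(char) % 2 for a char the isdigit filter admitted; .getD 0 is never hit on digits.
def pvDigitMod2 (c : Char) : Int :=
  PySem.Int.mod ((PySem.Int.ofStr? (String.mk [c])).getD 0) 2

-- the while-loop of A: indices i, j and the start_with_even toggle, appending to result
def pvLoopA (ev od : List Char) (i j : Nat) (flag : Bool) (acc : List Char) : List Char :=
  if h : i < ev.length ∧ j < od.length then
    if flag then
      pvLoopA ev od (i + 1) j false (acc ++ [ev[i]'h.1])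
    else
      pvLoopA ev od i (j + 1) true (acc ++ [od[j]'h.2])
  else
    -- result.extend(even_digits[i:]); result.extend(odd_digits[j:])  (i, j ≥ 0 so the slices are drops)
    acc ++ ev.drop i ++ od.drop j
termination_by (ev.length - i) + (od.length - j)
decreasing_by all_goals omega

def process_string (s : String) : String :=
  let digits := s.toList.filter (fun c => PySem.Chars.isdigit c)
  let special_chars := s.toList.filter (fun c => !(PySem.Chars.isalnum c))
  let even_digits := digits.filter (fun c => pvDigitMod2 c == 0)
  let odd_digits := digits.filter (fun c => !(pvDigitMod2 c == 0))
  let start_with_even := special_chars.length % 2 == 0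
  String.mk (pvLoopA even_digits odd_digits 0 0 start_with_even [])

-- ===== PORT B =====
-- the loop of B: keyed list plus the two per-parity counters ce, co
def pvKeyStep (offE offO : Int) (st : List (Int × Char) × Int × Int) (c : Char) :
    List (Int × Char) × Int × Int :=
  if PySem.Chars.isdigit c then
    if pvDigitMod2 c == 0 then (st.1 ++ [(2 * st.2.1 + offE, c)], st.2.1 + 1, st.2.2)
    else (st.1 ++ [(2 * st.2.2 + offO, c)], st.2.1, st.2.2 + 1)
  else st

def process_string_alt (s : String) : String :=
  -- specials = sum(1 for c in s if not c.isalnum())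
  let specials := s.toList.foldl (fun a c => if !(PySem.Chars.isalnum c) then a + 1 else a) (0 : Int)
  let even_first := PySem.Int.mod specials 2 == 0
  let offE : Int := if even_first then 0 else 1
  let offO : Int := if even_first then 1 else 0
  let keyed := (s.toList.foldl (pvKeyStep offE offO) ([], 0, 0)).1
  -- keyed.sort(key=lambda t: t[0])
  let sorted := PySem.List.sorted keyed (fun t => t.1) false
  String.mk (sorted.map Prod.snd)

-- ===== PRECONDITION & SPEC =====
def Spec_process_string (s : String) (out : String) : Prop := out = process_string_alt s
instance (s : String) (out : String) : Decidable (Spec_process_string s out) := by unfold Spec_process_string; infer_instance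

-- ===== CLAIM =====
def Claim_equal_process_string : Prop := ∀ (s : String), Dom_process_string s → Spec_process_string s (process_string s)

-- ===== LEMMAS AND PROOFS =====

-- abstract alternating merge: what A's while-loop + remainder extends compute
def pvMix : Bool → List Char → List Char → List Char
  | _, [], ys => ys
  | _, xs, [] => xs
  | true, x :: xs, y :: ys => x :: pvMix false xs (y :: ys)
  | false, x :: xs, y :: ys => y :: pvMix true (x :: xs) ys
termination_by _ xs ys => xs.length + ys.length

-- keys 2n+a, 2(n+1)+a, … attached to a list
def pvDec (a : Int) : Int → List Char → List (Int × Char)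
  | _, [] => []
  | n, c :: cs => (2 * n + a, c) :: pvDec a (n + 1) cs

-- the keyed image of the alternating merge: keys 2n, 2n+1, 2n+2, …
def pvKMix : Int → List Char → List Char → List (Int × Char)
  | n, [], ys => pvDec 1 n ys
  | n, xs, [] => pvDec 0 n xs
  | n, x :: xs, y :: ys => (2 * n, x) :: (2 * n + 1, y) :: pvKMix (n + 1) xs ys

theorem pvMix_nil_right (f : Bool) (xs : List Char) : pvMix f xs [] = xs := by
  cases xs <;> simp [pvMix]

theorem pvMix_false_cons (xs ys : List Char) (y : Char) :
    pvMix false xs (y :: ys) = y :: pvMix true xs ys := by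
  cases xs <;> simp [pvMix]

theorem pvLoopA_eq (ev od : List Char) :
    ∀ n i j flag acc, (ev.length - i) + (od.length - j) ≤ n →
      pvLoopA ev od i j flag acc = acc ++ pvMix flag (ev.drop i) (od.drop j) := by
  intro n
  induction n with
  | zero =>
      intro i j flag acc h
      rw [pvLoopA]
      have hi : ¬ (i < ev.length ∧ j < od.length) := by omega
      rw [dif_neg hi]
      have : ev.drop i = [] ∨ od.drop j = [] := by
        rcases Nat.lt_or_ge i ev.length with h1 | h1
        · right; exact List.drop_eq_nil_of_le (by omega)
        · left; exact List.drop_eq_nil_of_le h1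
      rcases this with h1 | h1 <;> simp [h1, pvMix, pvMix_nil_right]
  | succ n ih =>
      intro i j flag acc h
      rw [pvLoopA]
      by_cases hij : i < ev.length ∧ j < od.length
      · rw [dif_pos hij]
        have hev : ev.drop i = ev[i]'hij.1 :: ev.drop (i + 1) :=
          List.drop_eq_getElem_cons hij.1
        have hod : od.drop j = od[j]'hij.2 :: od.drop (j + 1) :=
          List.drop_eq_getElem_cons hij.2
        cases flag with
        | true =>
            rw [ih (i + 1) j false _ (by omega), hev, hod, pvMix]
            simp
        | false =>
            rw [ih i (j + 1) true _ (by omega), hev, hod, pvMix]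
            simp
      · rw [dif_neg hij]
        have : ev.drop i = [] ∨ od.drop j = [] := by
          rcases Nat.lt_or_ge i ev.length with h1 | h1
          · right; exact List.drop_eq_nil_of_le (by omega)
          · left; exact List.drop_eq_nil_of_le h1
        rcases this with h1 | h1 <;> simp [h1, pvMix, pvMix_nil_right]

theorem pvMix_swap_aux : ∀ (n : Nat) (f : Bool) (xs ys : List Char), xs.length + ys.length ≤ n →
    pvMix f xs ys = pvMix (!f) ys xs := by
  intro n
  induction n with
  | zero =>
      intro f xs ys h
      have hx : xs = [] := by cases xs <;> simp_all
      have hy : ys = [] := by cases ys <;> simp_all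
      simp [hx, hy, pvMix]
  | succ n ih =>
      intro f xs ys h
      cases xs with
      | nil => simp [pvMix, pvMix_nil_right]
      | cons x xs =>
          cases ys with
          | nil => simp [pvMix, pvMix_nil_right]
          | cons y ys =>
              cases f with
              | true =>
                  simp only [pvMix, Bool.not_true]
                  exact congrArg _ (ih false xs (y :: ys) (by simp at h ⊢; omega))
              | false =>
                  simp only [pvMix, Bool.not_false]
                  exact congrArg _ (ih true (x :: xs) ys (by simp at h ⊢; omega))

theorem pvMix_false_swap (xs ys : List Char) : pvMix false xs ys = pvMix true ys xs :=
  pvMix_swap_aux (xs.length + ys.length) false xs ys (le_refl _)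

theorem pvDec_map_snd (a : Int) : ∀ (n : Int) (l : List Char), (pvDec a n l).map Prod.snd = l := by
  intro n l
  induction l generalizing n with
  | nil => simp [pvDec]
  | cons c cs ih => simp [pvDec, ih]

theorem pvKMix_map_snd : ∀ (xs : List Char) (n : Int) (ys : List Char),
    (pvKMix n xs ys).map Prod.snd = pvMix true xs ys := by
  intro xs
  induction xs with
  | nil => intro n ys; simp [pvKMix, pvMix, pvDec_map_snd]
  | cons x xs ih =>
      intro n ys
      cases ys with
      | nil => simp [pvKMix, pvMix_nil_right, pvDec_map_snd]
      | cons y ys =>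
          simp [pvKMix, pvMix, pvMix_false_cons, ih]

theorem pvDec_lb (a : Int) : ∀ (n : Int) (l : List Char) (p : Int × Char),
    p ∈ pvDec a n l → 2 * n + a ≤ p.1 := by
  intro n l
  induction l generalizing n with
  | nil => intro p hp; simp [pvDec] at hp
  | cons c cs ih =>
      intro p hp
      simp only [pvDec, List.mem_cons] at hp
      rcases hp with h | h
      · simp [h]
      · have := ih (n + 1) p h; omega

theorem pvDec_pairwise (a : Int) : ∀ (n : Int) (l : List Char),
    (pvDec a n l).Pairwise (fun p q => p.1 < q.1) := by
  intro n l
  induction l generalizing n with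
  | nil => simp [pvDec]
  | cons c cs ih =>
      refine List.Pairwise.cons ?_ (ih (n + 1))
      intro q hq
      have := pvDec_lb a (n + 1) cs q hq
      simp; omega

theorem pvKMix_lb : ∀ (xs : List Char) (n : Int) (ys : List Char) (p : Int × Char),
    p ∈ pvKMix n xs ys → 2 * n ≤ p.1 := by
  intro xs
  induction xs with
  | nil =>
      intro n ys p hp
      have := pvDec_lb 1 n ys p (by simpa [pvKMix] using hp); omega
  | cons x xs ih =>
      intro n ys p hp
      cases ys with
      | nil =>
          have := pvDec_lb 0 n (x :: xs) p (by simpa [pvKMix] using hp); omega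
      | cons y ys =>
          simp only [pvKMix, List.mem_cons] at hp
          rcases hp with h | h | h
          · simp [h]
          · simp [h]
          · have := ih (n + 1) ys p h; omega

theorem pvKMix_pairwise : ∀ (xs : List Char) (n : Int) (ys : List Char),
    (pvKMix n xs ys).Pairwise (fun p q => p.1 < q.1) := by
  intro xs
  induction xs with
  | nil => intro n ys; simpa [pvKMix] using pvDec_pairwise 1 n ys
  | cons x xs ih =>
      intro n ys
      cases ys with
      | nil => simpa [pvKMix] using pvDec_pairwise 0 n (x :: xs)
      | cons y ys =>
          simp only [pvKMix]
          refine List.Pairwise.cons ?_ (List.Pairwise.cons ?_ (ih (n + 1) ys))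
          · intro q hq
            simp only [List.mem_cons] at hq
            rcases hq with h | h
            · simp [h]
            · have := pvKMix_lb xs (n + 1) ys q h; simp; omega
          · intro q hq
            have := pvKMix_lb xs (n + 1) ys q hq; simp; omega

theorem pvKMix_perm : ∀ (xs : List Char) (n : Int) (ys : List Char),
    (pvKMix n xs ys).Perm (pvDec 0 n xs ++ pvDec 1 n ys) := by
  intro xs
  induction xs with
  | nil => intro n ys; simp [pvKMix, pvDec]
  | cons x xs ih =>
      intro n ys
      cases ys with
      | nil => simp [pvKMix, pvDec]
      | cons y ys =>
          simp only [pvKMix, pvDec, List.cons_append, Int.add_zero]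
          refine List.Perm.cons _ ?_
          refine List.Perm.trans (List.Perm.cons _ (ih (n + 1) ys)) ?_
          exact List.perm_middle.symm

-- B's fold builds a permutation of the two decorated parity classes
theorem pvKeyFold (offE offO : Int) :
    ∀ (l : List Char) (acc : List (Int × Char)) (e o : Int),
      (l.foldl (pvKeyStep offE offO) (acc, e, o)).1.Perm
        (acc ++ pvDec offE e ((l.filter (fun c => PySem.Chars.isdigit c)).filter (fun c => pvDigitMod2 c == 0))
             ++ pvDec offO o ((l.filter (fun c => PySem.Chars.isdigit c)).filter (fun c => !(pvDigitMod2 c == 0)))) := by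
  intro l
  induction l with
  | nil => intro acc e o; simp [pvDec]
  | cons c l ih =>
      intro acc e o
      rw [List.foldl_cons]
      by_cases hd : PySem.Chars.isdigit c
      · by_cases he : (pvDigitMod2 c == 0) = true
        · have hstep : pvKeyStep offE offO (acc, e, o) c = (acc ++ [(2 * e + offE, c)], e + 1, o) := by
            simp [pvKeyStep, hd, he]
          rw [hstep]
          refine (ih _ (e + 1) o).trans (List.Perm.of_eq ?_)
          simp [hd, he, pvDec, List.append_assoc]
        · have hf : (pvDigitMod2 c == 0) = false := by simpa using he
          have hstep : pvKeyStep offE offO (acc, e, o) c = (acc ++ [(2 * o + offO, c)], e, o + 1) := by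
            simp [pvKeyStep, hd, hf]
          rw [hstep]
          refine (ih _ e (o + 1)).trans ?_
          simp only [List.filter_cons, hd, hf, Bool.not_false, if_true,
            pvDec, List.append_assoc, List.singleton_append]
          refine List.Perm.append_left acc ?_
          exact List.perm_middle.symm
      · have hstep : pvKeyStep offE offO (acc, e, o) c = (acc, e, o) := by
          simp [pvKeyStep, hd]
        rw [hstep]
        simpa [List.filter_cons, hd] using ih acc e o

-- sum(1 for …) fold = length of the filter, as an Int
theorem pvCount_foldl (l : List Char) :
    ∀ (a : Int), l.foldl (fun a c => if !(PySem.Chars.isalnum c) then a + 1 else a) a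
      = a + ((l.filter (fun c => !(PySem.Chars.isalnum c))).length : Int) := by
  induction l with
  | nil => intro a; simp
  | cons c l ih =>
      intro a
      rw [List.foldl_cons]
      by_cases h : PySem.Chars.isalnum c
      · rw [if_neg (by simp [h]), ih, List.filter_cons_of_neg (by simp [h])]
      · rw [if_pos (by simp [h]), ih, List.filter_cons_of_pos (by simp [h])]
        simp only [List.length_cons]
        push_cast; ring

theorem pvIntMod_two_nat (m : Nat) : PySem.Int.mod (m : Int) 2 = ((m % 2 : Nat) : Int) := by
  exact_mod_cast PySem.Int.mod_natCast m 2

-- ===== VERDICT =====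
theorem process_string_spec : Claim_equal_process_string := by
  intro s _
  unfold Spec_process_string process_string process_string_alt
  simp only
  set digits := s.toList.filter (fun c => PySem.Chars.isdigit c) with hdig
  set E := digits.filter (fun c => pvDigitMod2 c == 0) with hE
  set O := digits.filter (fun c => !(pvDigitMod2 c == 0)) with hO
  set m := (s.toList.filter (fun c => !(PySem.Chars.isalnum c))).length with hm
  have hloop : ∀ flag, pvLoopA E O 0 0 flag [] = pvMix flag E O := by
    intro flag
    rw [pvLoopA_eq E O (E.length + O.length) 0 0 flag [] (by omega)]
    simp
  have hcnt : s.toList.foldl (fun a c => if !(PySem.Chars.isalnum c) then a + 1 else a) (0 : Int)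
      = (m : Int) := by
    rw [pvCount_foldl, ← hm]; simp
  have hmod : (PySem.Int.mod ((m : Nat) : Int) 2 == 0) = (m % 2 == 0) := by
    rw [pvIntMod_two_nat]
    rcases Nat.mod_two_eq_zero_or_one m with h | h <;> simp [h]
  rw [hcnt, hmod]
  by_cases hp : m % 2 = 0
  · -- even_first: offsets (0, 1); the sorted keyed list is pvKMix 0 E O
    have hperm : ((s.toList.foldl (pvKeyStep 0 1) ([], 0, 0)).1).Perm (pvKMix 0 E O) := by
      refine (pvKeyFold 0 1 s.toList [] 0 0).trans ?_
      simp only [List.nil_append, ← hdig, ← hE, ← hO]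
      exact (pvKMix_perm E 0 O).symm
    have hsorted : PySem.List.sorted ((s.toList.foldl (pvKeyStep 0 1) ([], 0, 0)).1)
        (fun t => t.1) false = pvKMix 0 E O :=
      PySem.List.sorted_eq_of_perm_of_pairwise_lt _ _ (fun t => t.1) hperm.symm (pvKMix_pairwise E 0 O)
    simp only [hp, beq_self_eq_true, if_true, hloop]
    rw [hsorted, pvKMix_map_snd]
  · -- odd_first: offsets (1, 0); the sorted keyed list is pvKMix 0 O E
    have hbf : (m % 2 == 0) = false := by simp [hp]
    have hperm : ((s.toList.foldl (pvKeyStep 1 0) ([], 0, 0)).1).Perm (pvKMix 0 O E) := by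
      refine (pvKeyFold 1 0 s.toList [] 0 0).trans ?_
      simp only [List.nil_append, ← hdig, ← hE, ← hO]
      refine (List.perm_append_comm).trans ?_
      exact (pvKMix_perm O 0 E).symm
    have hsorted : PySem.List.sorted ((s.toList.foldl (pvKeyStep 1 0) ([], 0, 0)).1)
        (fun t => t.1) false = pvKMix 0 O E :=
      PySem.List.sorted_eq_of_perm_of_pairwise_lt _ _ (fun t => t.1) hperm.symm (pvKMix_pairwise O 0 E)
    simp only [hbf, hloop, pvMix_false_swap, Bool.false_eq_true, if_false]
    rw [hsorted, pvKMix_map_snd]
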